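-- pv_equiv track=rewrite | github.com/jadewisemann/ps_everyday | 백준/그래프/BOJ(그래프)[Platinum5]배열에서_이동#1981.py | bfs_with_restriction
-- ===== SOURCE A (Python) =====
-- from collections import deque
--
-- def bfs_with_restriction(n, grid, si, sj, ei, ej, low, high):
--     if not(low <= grid[si][sj] <= high):
--         return False
--
--     vis = [[False for _ in range(n)] for _ in range(n)]
--     q = deque([(si, sj)])
--     vis[si][sj] = True
--
--     while q:
--         ci, cj = q.popleft()
--
--         if ci == ei and cj == ej:
--             return True
--
--         for di, dj in ((1, 0), (0, 1), (-1, 0), (0, -1)):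
--             ni, nj = ci + di, cj + dj
--             if not(0 <= ni < n and 0 <= nj < n): continue
--             if vis[ni][nj]: continue
--             if low <= grid[ni][nj] <= high:
--                 vis[ni][nj] = True
--                 q.append((ni, nj))
--
--     return False
-- ===== SOURCE B (Python) =====
-- def bfs_with_restriction(n, grid, si, sj, ei, ej, low, high):
--     # Saturation / fixed-point reachability: no queue, no visited matrix.
--     # Grow the reachable set of cells until it stops changing (at most n*n rounds),
--     # then simply test membership of the target cell.
--     if not (low <= grid[si][sj] <= high):
--         return False
--     reach = {(si, sj)}
--     for _ in range(n * n):
--         grown = reach | {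
--             (i + di, j + dj)
--             for (i, j) in reach
--             for (di, dj) in ((1, 0), (0, 1), (-1, 0), (0, -1))
--             if 0 <= i + di < n and 0 <= j + dj < n
--             and low <= grid[i + di][j + dj] <= high
--         }
--         if grown == reach:
--             break
--         reach = grown
--     return (ei, ej) in reach
-- ===== Notes on version B (the rewrite author's own statement) =====
-- stated objective: alternative
-- what changed: Replaced the queue-based BFS with visited matrix and early return by a fixed-point saturation: grow one set of reachable cells (set union of the current set with all its admissible neighbours) until it stops changing, then test membership of the target cell.
-- outside the precondition, e.g. on bfs_with_restriction(2, [[5, 5], [5, 5]], -1, 0, 0, 0, 1, 9): A returns True, B returns True; on bfs_with_restriction(2, [[5]], 0, 0, 0, 0, 1, 9): A returns True, B raises IndexError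
import Mathlib
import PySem

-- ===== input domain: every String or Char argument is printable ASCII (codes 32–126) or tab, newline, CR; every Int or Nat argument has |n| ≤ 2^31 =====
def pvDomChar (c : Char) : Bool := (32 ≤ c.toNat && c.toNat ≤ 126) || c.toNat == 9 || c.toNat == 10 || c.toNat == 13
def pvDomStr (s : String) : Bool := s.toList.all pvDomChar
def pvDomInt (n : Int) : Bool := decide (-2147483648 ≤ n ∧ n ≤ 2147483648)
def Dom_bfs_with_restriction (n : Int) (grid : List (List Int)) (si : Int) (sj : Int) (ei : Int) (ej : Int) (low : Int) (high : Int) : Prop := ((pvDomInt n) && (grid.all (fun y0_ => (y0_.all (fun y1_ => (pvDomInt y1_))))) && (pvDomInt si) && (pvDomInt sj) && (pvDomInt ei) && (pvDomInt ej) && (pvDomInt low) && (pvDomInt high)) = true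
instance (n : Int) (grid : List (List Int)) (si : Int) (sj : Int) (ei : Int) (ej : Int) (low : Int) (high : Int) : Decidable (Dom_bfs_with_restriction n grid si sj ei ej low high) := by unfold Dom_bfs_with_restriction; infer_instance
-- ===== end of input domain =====

-- B replaces the queue-based BFS with visited matrix by a fixed-point saturation over a set
-- of cells (grow the reachable set until it stops changing, then test membership): alternative
-- decomposition, same exact results on the stated precondition Pre_ below.

-- ===== PORT A =====
-- grid[i][j] (total form; indices are in range wherever the ports read, under Pre_)
def pvVal (grid : List (List Int)) (i j : Int) : Int :=
  PySem.List.pyGetD (PySem.List.pyGetD grid i []) j 0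

-- the direction tuple ((1,0),(0,1),(-1,0),(0,-1))
def dirsA : List (Int × Int) := [(1, 0), (0, 1), (-1, 0), (0, -1)]

-- vis = [[False for _ in range(n)] for _ in range(n)]
def mkVis (n : Int) : List (List Bool) :=
  (PySem.List.pyRange 0 n 1).map (fun _ => (PySem.List.pyRange 0 n 1).map (fun _ => false))

-- vis[i][j]  (read)
def getV (vis : List (List Bool)) (i j : Int) : Bool :=
  PySem.List.pyGetD (PySem.List.pyGetD vis i []) j false

-- vis[i][j] = True  (write)
def setV (vis : List (List Bool)) (i j : Int) : List (List Bool) :=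
  PySem.List.pySetD vis i (PySem.List.pySetD (PySem.List.pyGetD vis i []) j true)

-- body of "for di, dj in ((1,0),(0,1),(-1,0),(0,-1)): …" — state is (vis, q)
def relaxA (n : Int) (grid : List (List Int)) (low high ci cj : Int)
    (st : List (List Bool) × List (Int × Int)) (d : Int × Int) :
    List (List Bool) × List (Int × Int) :=
  let ni := ci + d.1
  let nj := cj + d.2
  if 0 ≤ ni ∧ ni < n ∧ 0 ≤ nj ∧ nj < n then
    if getV st.1 ni nj then st
    else if low ≤ pvVal grid ni nj ∧ pvVal grid ni nj ≤ high then
      (setV st.1 ni nj, st.2 ++ [(ni, nj)])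
    else st
  else st

-- the "while q:" loop (fuel only makes it total; it never runs out under Pre_, see the proofs)
def loopA (n : Int) (grid : List (List Int)) (ei ej low high : Int) :
    Nat → List (List Bool) → List (Int × Int) → Bool
  | 0, _, _ => false
  | fuel + 1, vis, q =>
    match q with
    | [] => false
    | (ci, cj) :: q' =>
      if ci = ei ∧ cj = ej then true
      else
        let st := dirsA.foldl (relaxA n grid low high ci cj) (vis, q')
        loopA n grid ei ej low high fuel st.1 st.2

def bfs_with_restriction (n : Int) (grid : List (List Int)) (si : Int) (sj : Int) (ei : Int) (ej : Int) (low : Int) (high : Int) : Bool :=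
  if low ≤ pvVal grid si sj ∧ pvVal grid si sj ≤ high then
    let vis := mkVis n
    let vis := setV vis si sj
    loopA n grid ei ej low high (n.toNat * n.toNat + 1) vis [(si, sj)]
  else false

-- ===== PORT B =====
-- the comprehension's filter: 0 <= i < n and 0 <= j < n and low <= grid[i][j] <= high
def okCellB (n : Int) (grid : List (List Int)) (low high i j : Int) : Bool :=
  decide (0 ≤ i) && decide (i < n) && decide (0 ≤ j) && decide (j < n) &&
  decide (low ≤ pvVal grid i j) && decide (pvVal grid i j ≤ high)

-- inner part of the set comprehension: all admissible neighbours of one cell c, added to g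
def growCell (n : Int) (grid : List (List Int)) (low high : Int)
    (g : PySem.Set (Int × Int)) (c : Int × Int) : PySem.Set (Int × Int) :=
  dirsA.foldl
    (fun g d =>
      if okCellB n grid low high (c.1 + d.1) (c.2 + d.2) then
        PySem.Set.add g (c.1 + d.1, c.2 + d.2)
      else g)
    g

-- grown = reach | {…comprehension over reach…}
def roundB (n : Int) (grid : List (List Int)) (low high : Int)
    (reach : PySem.Set (Int × Int)) : PySem.Set (Int × Int) :=
  PySem.Set.union reach (reach.foldl (growCell n grid low high) PySem.Set.empty)

-- for _ in range(n*n): grown = …; if grown == reach: break; reach = grown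
def loopB (n : Int) (grid : List (List Int)) (low high : Int) :
    Nat → PySem.Set (Int × Int) → PySem.Set (Int × Int)
  | 0, reach => reach
  | k + 1, reach =>
    let grown := roundB n grid low high reach
    if PySem.Set.equal grown reach then reach
    else loopB n grid low high k grown

def bfs_with_restriction_alt (n : Int) (grid : List (List Int)) (si : Int) (sj : Int) (ei : Int) (ej : Int) (low : Int) (high : Int) : Bool :=
  if low ≤ pvVal grid si sj ∧ pvVal grid si sj ≤ high then
    let reach := PySem.Set.ofList [(si, sj)]
    PySem.Set.contains (loopB n grid low high (n.toNat * n.toNat) reach) (ei, ej)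
  else false

-- ===== PRECONDITION & SPEC =====
-- Pre_ admits (i) every input on which the start-cell guard fails -- the start access
-- grid[si][sj] succeeds (Python indexing, so possibly negative) and its value is outside
-- [low, high], where both programs immediately return False -- and (ii) the task's natural
-- domain: an n-by-n grid with all four cell indices in [0, n).  It excludes guard-passing
-- inputs with wrapped (negative) start indices or ragged / n-mismatched grids, on which A's
-- further behaviour is an accident of which cells its BFS happens to touch and B's
-- saturation may raise IndexError.
def Pre_bfs_with_restriction (n : Int) (grid : List (List Int)) (si : Int) (sj : Int) (ei : Int) (ej : Int) (low : Int) (high : Int) : Prop :=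
  (PySem.Raise.InRange grid.length si ∧
    PySem.Raise.InRange (PySem.List.pyGetD grid si []).length sj ∧
    ¬ (low ≤ PySem.List.pyGetD (PySem.List.pyGetD grid si []) sj 0 ∧
       PySem.List.pyGetD (PySem.List.pyGetD grid si []) sj 0 ≤ high)) ∨
  (grid.length = n.toNat ∧ (∀ r ∈ grid, r.length = n.toNat) ∧
   0 ≤ si ∧ si < n ∧ 0 ≤ sj ∧ sj < n ∧ 0 ≤ ei ∧ ei < n ∧ 0 ≤ ej ∧ ej < n)
instance (n : Int) (grid : List (List Int)) (si : Int) (sj : Int) (ei : Int) (ej : Int) (low : Int) (high : Int) : Decidable (Pre_bfs_with_restriction n grid si sj ei ej low high) := by unfold Pre_bfs_with_restriction; infer_instance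

def pvWitness_bfs_with_restriction : Int × List (List Int) × Int × Int × Int × Int × Int × Int :=
  (2, [[1, 5], [2, 3]], 0, 0, 1, 1, 1, 3)

def Spec_bfs_with_restriction (n : Int) (grid : List (List Int)) (si : Int) (sj : Int) (ei : Int) (ej : Int) (low : Int) (high : Int) (out : Bool) : Prop := out = bfs_with_restriction_alt n grid si sj ei ej low high
instance (n : Int) (grid : List (List Int)) (si : Int) (sj : Int) (ei : Int) (ej : Int) (low : Int) (high : Int) (out : Bool) : Decidable (Spec_bfs_with_restriction n grid si sj ei ej low high out) := by unfold Spec_bfs_with_restriction; infer_instance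

-- ===== CLAIM (what is proved, stated in full; the proofs are below) =====
def Claim_equal_bfs_with_restriction : Prop := ∀ (n : Int) (grid : List (List Int)) (si : Int) (sj : Int) (ei : Int) (ej : Int) (low : Int) (high : Int), Dom_bfs_with_restriction n grid si sj ei ej low high → Pre_bfs_with_restriction n grid si sj ei ej low high → Spec_bfs_with_restriction n grid si sj ei ej low high (bfs_with_restriction n grid si sj ei ej low high)

-- ===== LEMMAS AND PROOFS =====

def okB (n : Int) (c : Int × Int) : Prop :=
  0 ≤ c.1 ∧ c.1 < n ∧ 0 ≤ c.2 ∧ c.2 < n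

def Vsh (n : Int) (vis : List (List Bool)) : Prop :=
  vis.length = n.toNat ∧ ∀ r ∈ vis, r.length = n.toNat

def fcV (vis : List (List Bool)) : Nat :=
  (vis.map (fun r => r.countP (fun x => !x))).sum

lemma pyGetD_all_eq {α : Type} (l : List α) (i : Int) (c : α)
    (h : ∀ y ∈ l, y = c) : PySem.List.pyGetD l i c = c := by
  unfold PySem.List.pyGetD
  cases h' : PySem.List.pyGet? l i with
  | none => rfl
  | some y => exact h y (PySem.List.mem_of_pyGet?_eq_some l h')

lemma shape_mkVis (n : Int) : Vsh n (mkVis n) := by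
  constructor
  · simp [mkVis, PySem.List.length_pyRange_one]
  · intro r hr
    simp [mkVis] at hr
    obtain ⟨i, _, rfl⟩ := hr
    simp [PySem.List.length_pyRange_one]

lemma getV_mkVis (n : Int) (a b : Int) : getV (mkVis n) a b = false := by
  unfold getV
  cases h' : PySem.List.pyGet? (mkVis n) a with
  | none =>
    simp only [PySem.List.pyGetD, h', Option.getD_none]
    exact pyGetD_all_eq [] b false (by intro y hy; cases hy)
  | some row =>
    have hm := PySem.List.mem_of_pyGet?_eq_some _ h'
    simp only [PySem.List.pyGetD, h', Option.getD_some]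
    apply pyGetD_all_eq
    intro y hy
    simp [mkVis] at hm
    obtain ⟨i, _, rfl⟩ := hm
    simp at hy
    exact hy.2

lemma fc_mkVis (n : Int) : fcV (mkVis n) = n.toNat * n.toNat := by
  unfold fcV mkVis
  rw [List.map_map]
  have : ((fun r => List.countP (fun x => !x) r) ∘ fun _ => (PySem.List.pyRange 0 n 1).map fun _ => false)
      = fun (_ : Int) => n.toNat := by
    funext z
    simp only [Function.comp]
    rw [List.countP_eq_length.mpr (by intro a ha; simp at ha; simp [ha])]
    simp [PySem.List.length_pyRange_one]
  rw [this, PySem.List.sum_map_const_nat, PySem.List.length_pyRange_one, Nat.mul_comm]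
  norm_num

lemma shape_setV (n : Int) (vis : List (List Bool)) (i j : Int)
    (hs : Vsh n vis) (hi : 0 ≤ i) (hi2 : i < n) : Vsh n (setV vis i j) := by
  obtain ⟨h1, h2⟩ := hs
  have hlt : i < (vis.length : Int) := by rw [h1]; omega
  unfold setV
  rw [PySem.List.pySetD_of_nonneg _ _ hi,
    PySem.List.pyGetD_eq_getElem vis [] hi hlt]
  constructor
  · simp [h1]
  · intro r hr
    rcases List.mem_or_eq_of_mem_set hr with h | rfl
    · exact h2 r h
    · rw [PySem.List.length_pySetD]
      exact h2 _ (List.getElem_mem _)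

lemma getV_setV (n : Int) (vis : List (List Bool)) (i j a b : Int)
    (hs : Vsh n vis) (hij : okB n (i, j)) (hab : okB n (a, b)) :
    getV (setV vis i j) a b = if a = i ∧ b = j then true else getV vis a b := by
  obtain ⟨hL, hR⟩ := hs
  obtain ⟨hi1, hi2, hj1, hj2⟩ := hij
  obtain ⟨ha1, ha2, hb1, hb2⟩ := hab
  simp only at hi1 hi2 hj1 hj2 ha1 ha2 hb1 hb2
  have hiL : i.toNat < vis.length := by rw [hL]; omega
  have haL : a.toNat < vis.length := by rw [hL]; omega
  have hrowi := hR _ (vis.getElem_mem hiL)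
  have hrowa := hR _ (vis.getElem_mem haL)
  have hsv : setV vis i j
      = vis.set i.toNat ((vis[i.toNat]'hiL).set j.toNat true) := by
    unfold setV
    rw [PySem.List.pySetD_of_nonneg _ _ hi1,
      PySem.List.pyGetD_eq_getElem vis [] hi1 (by rw [hL]; omega),
      PySem.List.pySetD_of_nonneg _ _ hj1]
  rw [hsv]
  unfold getV
  rw [PySem.List.pyGetD_eq_getElem _ ([] : List Bool) ha1
      (by simp only [List.length_set]; rw [hL]; omega),
    PySem.List.pyGetD_eq_getElem vis ([] : List Bool) ha1 (by rw [hL]; omega),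
    List.getElem_set]
  by_cases hia : i.toNat = a.toNat
  · have hai : a = i := by omega
    rw [if_pos hia]
    have hbl : b < ((vis[i.toNat]'hiL).length : Int) := by rw [hrowi]; omega
    rw [PySem.List.pyGetD_eq_getElem _ false hb1 (by simp only [List.length_set]; exact hbl),
      List.getElem_set,
      PySem.List.pyGetD_eq_getElem _ false hb1 (by rw [hrowa]; omega)]
    by_cases hjb : j.toNat = b.toNat
    · have : b = j := by omega
      simp [hjb, hai, this]
    · have : ¬ (b = j) := by omega
      have hav : vis[a.toNat]'haL = vis[i.toNat]'hiL := by congr 1; omega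
      simp [hjb, hai, this, hav]
  · have : ¬ (a = i) := by omega
    rw [if_neg hia, if_neg (by tauto : ¬ (a = i ∧ b = j))]

lemma row_count_set : ∀ (r : List Bool) (k : Nat), k < r.length → r.getD k true = false →
    (r.set k true).countP (fun x => !x) + 1 = r.countP (fun x => !x) := by
  intro r
  induction r with
  | nil => intro k h; simp at h
  | cons x t ih =>
    intro k hk hv
    cases k with
    | zero =>
      simp at hv
      subst hv
      simp [List.countP_cons]
    | succ m =>
      simp only [List.getD_cons_succ] at hv
      simp only [List.length_cons, Nat.succ_lt_succ_iff] at hk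
      simp only [List.set_cons_succ, List.countP_cons]
      have := ih m hk hv
      omega

lemma map_sum_set (f : List Bool → Nat) :
    ∀ (vis : List (List Bool)) (k : Nat) (row' : List Bool), k < vis.length →
    ((vis.set k row').map f).sum + f (vis.getD k []) = (vis.map f).sum + f row' := by
  intro vis
  induction vis with
  | nil => intro k _ h; simp at h
  | cons x t ih =>
    intro k row' hk
    cases k with
    | zero => simp; omega
    | succ m =>
      simp only [List.length_cons, Nat.succ_lt_succ_iff] at hk
      simp only [List.set_cons_succ, List.map_cons, List.sum_cons, List.getD_cons_succ]
      have := ih m row' hk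
      omega

lemma fc_setV (n : Int) (vis : List (List Bool)) (i j : Int)
    (hs : Vsh n vis) (hij : okB n (i, j)) (h : getV vis i j = false) :
    fcV (setV vis i j) + 1 = fcV vis := by
  obtain ⟨hL, hR⟩ := hs
  obtain ⟨hi1, hi2, hj1, hj2⟩ := hij
  simp only at hi1 hi2 hj1 hj2
  have hiL : i.toNat < vis.length := by rw [hL]; omega
  have hrowi := hR _ (vis.getElem_mem hiL)
  have hjL : j.toNat < (vis[i.toNat]'hiL).length := by rw [hrowi]; omega
  have hsv : setV vis i j
      = vis.set i.toNat ((vis[i.toNat]'hiL).set j.toNat true) := by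
    unfold setV
    rw [PySem.List.pySetD_of_nonneg _ _ hi1,
      PySem.List.pyGetD_eq_getElem vis [] hi1 (by rw [hL]; omega),
      PySem.List.pySetD_of_nonneg _ _ hj1]
  have hvv : (vis[i.toNat]'hiL).getD j.toNat true = false := by
    unfold getV at h
    rw [PySem.List.pyGetD_eq_getElem vis [] hi1 (by rw [hL]; omega),
      PySem.List.pyGetD_eq_getElem _ false hj1 (by rw [hrowi]; omega)] at h
    rw [List.getD_eq_getElem _ _ hjL]
    exact h
  have h1 := map_sum_set (fun r => r.countP (fun x => !x)) vis i.toNat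
    ((vis[i.toNat]'hiL).set j.toNat true) hiL
  have h2 := row_count_set (vis[i.toNat]'hiL) j.toNat hjL hvv
  unfold fcV
  rw [hsv]
  have hgd : vis.getD i.toNat [] = vis[i.toNat]'hiL := List.getD_eq_getElem _ _ hiL
  rw [hgd] at h1
  beta_reduce at h1
  omega

def okP (n : Int) (grid : List (List Int)) (low high : Int) (c : Int × Int) : Prop :=
  okB n c ∧ low ≤ pvVal grid c.1 c.2 ∧ pvVal grid c.1 c.2 ≤ high

def stepP (n : Int) (grid : List (List Int)) (low high : Int) (a b : Int × Int) : Prop :=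
  okP n grid low high b ∧
  (b = (a.1 + 1, a.2) ∨ b = (a.1, a.2 + 1) ∨ b = (a.1 - 1, a.2) ∨ b = (a.1, a.2 - 1))

def Rch (n : Int) (grid : List (List Int)) (low high : Int) (a b : Int × Int) : Prop :=
  Relation.ReflTransGen (stepP n grid low high) a b

lemma rtg_closed (n : Int) (grid : List (List Int)) (low high : Int) (P : Int × Int → Prop)
    (hP : ∀ a b, P a → stepP n grid low high a b → P b) :
    ∀ a c, P a → Rch n grid low high a c → P c := by
  intro a c ha h
  induction h with
  | refl => exact ha
  | tail _ hstep ih => exact hP _ _ ih hstep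

lemma stepP_cases (n : Int) (grid : List (List Int)) (low high : Int) (a b : Int × Int)
    (h : stepP n grid low high a b) :
    ∃ d ∈ dirsA, b = (a.1 + d.1, a.2 + d.2) ∧ okP n grid low high (a.1 + d.1, a.2 + d.2) := by
  obtain ⟨hok, hc⟩ := h
  rcases hc with rfl | rfl | rfl | rfl
  · exact ⟨(1, 0), by simp [dirsA], by simp, by simpa using hok⟩
  · exact ⟨(0, 1), by simp [dirsA], by simp, by simpa using hok⟩
  · refine ⟨(-1, 0), by simp [dirsA], by simp [Prod.ext_iff]; ring, ?_⟩
    simpa [Int.sub_eq_add_neg] using hok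
  · refine ⟨(0, -1), by simp [dirsA], by simp [Prod.ext_iff]; ring, ?_⟩
    simpa [Int.sub_eq_add_neg] using hok

lemma okCellB_iff (n : Int) (grid : List (List Int)) (low high i j : Int) :
    okCellB n grid low high i j = true ↔ okP n grid low high (i, j) := by
  simp [okCellB, okP, okB]
  tauto

lemma mem_foldl_addif {α β : Type} [BEq α] [LawfulBEq α] (P : β → Bool) (f : β → α) :
    ∀ (ds : List β) (g : PySem.Set α) (y : α),
    (y ∈ ds.foldl (fun g d => if P d then PySem.Set.add g (f d) else g) g ↔
      y ∈ g ∨ ∃ d ∈ ds, P d = true ∧ y = f d) := by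
  intro ds
  induction ds with
  | nil => simp
  | cons d t ih =>
    intro g y
    simp only [List.foldl_cons]
    rw [ih]
    by_cases hd : P d = true
    · simp only [hd, if_true, PySem.Set.mem_add]
      constructor
      · rintro ((h | rfl) | ⟨d', hd', hP, rfl⟩)
        · exact Or.inl h
        · exact Or.inr ⟨d, by simp, hd, rfl⟩
        · exact Or.inr ⟨d', by simp [hd'], hP, rfl⟩
      · rintro (h | ⟨d', hd', hP, rfl⟩)
        · exact Or.inl (Or.inl h)
        · rcases List.mem_cons.mp hd' with rfl | hd'
          · exact Or.inl (Or.inr rfl)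
          · exact Or.inr ⟨d', hd', hP, rfl⟩
    · simp only [hd, if_false]
      constructor
      · rintro (h | ⟨d', hd', hP, rfl⟩)
        · exact Or.inl h
        · exact Or.inr ⟨d', by simp [hd'], hP, rfl⟩
      · rintro (h | ⟨d', hd', hP, rfl⟩)
        · exact Or.inl h
        · rcases List.mem_cons.mp hd' with rfl | hd'
          · simp [hd] at hP
          · exact Or.inr ⟨d', hd', hP, rfl⟩

lemma dir_iff (n : Int) (grid : List (List Int)) (low high : Int) (c y : Int × Int) :
    (∃ d ∈ dirsA, okCellB n grid low high (c.1 + d.1) (c.2 + d.2) = true ∧ y = (c.1 + d.1, c.2 + d.2))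
      ↔ stepP n grid low high c y := by
  constructor
  · rintro ⟨d, hd, hok, rfl⟩
    rw [okCellB_iff] at hok
    refine ⟨hok, ?_⟩
    simp only [dirsA, List.mem_cons, List.mem_singleton] at hd
    rcases hd with rfl | rfl | rfl | rfl | h
    · left; simp
    · right; left; simp
    · right; right; left; simp [Prod.ext_iff]; ring
    · right; right; right; simp [Prod.ext_iff]; ring
    · cases h
  · intro h
    obtain ⟨d, hd, rfl, hok⟩ := stepP_cases n grid low high c y h
    exact ⟨d, hd, (okCellB_iff n grid low high _ _).mpr hok, rfl⟩

lemma mem_growCell (n : Int) (grid : List (List Int)) (low high : Int)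
    (g : PySem.Set (Int × Int)) (c y : Int × Int) :
    y ∈ growCell n grid low high g c ↔
      y ∈ g ∨ stepP n grid low high c y := by
  unfold growCell
  rw [mem_foldl_addif (fun d => okCellB n grid low high (c.1 + d.1) (c.2 + d.2))
    (fun d => (c.1 + d.1, c.2 + d.2)) dirsA g y]
  rw [dir_iff]

lemma mem_foldl_growCell (n : Int) (grid : List (List Int)) (low high : Int) :
    ∀ (cs : List (Int × Int)) (g : PySem.Set (Int × Int)) (y : Int × Int),
    (y ∈ cs.foldl (growCell n grid low high) g ↔
      y ∈ g ∨ ∃ c ∈ cs, stepP n grid low high c y) := by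
  intro cs
  induction cs with
  | nil => simp
  | cons c t ih =>
    intro g y
    simp only [List.foldl_cons]
    rw [ih, mem_growCell]
    constructor
    · rintro ((h | h) | ⟨c', hc', h⟩)
      · exact Or.inl h
      · exact Or.inr ⟨c, by simp, h⟩
      · exact Or.inr ⟨c', by simp [hc'], h⟩
    · rintro (h | ⟨c', hc', h⟩)
      · exact Or.inl (Or.inl h)
      · rcases List.mem_cons.mp hc' with rfl | hc'
        · exact Or.inl (Or.inr h)
        · exact Or.inr ⟨c', hc', h⟩

lemma mem_roundB (n : Int) (grid : List (List Int)) (low high : Int)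
    (r : PySem.Set (Int × Int)) (y : Int × Int) :
    y ∈ roundB n grid low high r ↔ y ∈ r ∨ ∃ c ∈ r, stepP n grid low high c y := by
  unfold roundB
  rw [PySem.Set.mem_union, mem_foldl_growCell]
  constructor
  · rintro (h | h | h)
    · exact Or.inl h
    · cases h
    · exact Or.inr h
  · rintro (h | h)
    · exact Or.inl h
    · exact Or.inr (Or.inr h)

lemma nodup_roundB (n : Int) (grid : List (List Int)) (low high : Int)
    (r : PySem.Set (Int × Int)) (hr : r.Nodup) : (roundB n grid low high r).Nodup := by
  unfold roundB
  exact PySem.Set.nodup_union _ _ hr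

lemma loopB_sound (n : Int) (grid : List (List Int)) (low high : Int) (s : Int × Int) :
    ∀ (k : Nat) (r : PySem.Set (Int × Int)), (∀ a ∈ r, Rch n grid low high s a) →
    ∀ a ∈ loopB n grid low high k r, Rch n grid low high s a := by
  intro k
  induction k with
  | zero => intro r hr a ha; exact hr a ha
  | succ m ih =>
    intro r hr a ha
    unfold loopB at ha
    simp only at ha
    split_ifs at ha
    · exact hr a ha
    · refine ih _ ?_ a ha
      intro b hb
      rcases (mem_roundB n grid low high r b).mp hb with h | ⟨c, hc, hstep⟩
      · exact hr b h
      · exact Relation.ReflTransGen.tail (hr c hc) hstep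

lemma loopB_mono (n : Int) (grid : List (List Int)) (low high : Int) :
    ∀ (k : Nat) (r : PySem.Set (Int × Int)) (y : Int × Int), y ∈ r →
    y ∈ loopB n grid low high k r := by
  intro k
  induction k with
  | zero => intro r y hy; exact hy
  | succ m ih =>
    intro r y hy
    unfold loopB
    simp only
    split_ifs
    · exact hy
    · exact ih _ y ((mem_roundB n grid low high r y).mpr (Or.inl hy))

def cellsL (n : Int) : List (Int × Int) :=
  (PySem.List.pyRange 0 n 1).flatMap (fun i => (PySem.List.pyRange 0 n 1).map (fun j => (i, j)))

lemma mem_cellsL (n : Int) (a : Int × Int) (h : okB n a) : a ∈ cellsL n := by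
  obtain ⟨h1, h2, h3, h4⟩ := h
  unfold cellsL
  rw [List.mem_flatMap]
  refine ⟨a.1, ?_, ?_⟩
  · rw [PySem.List.mem_pyRange_one]; omega
  · rw [List.mem_map]
    exact ⟨a.2, by rw [PySem.List.mem_pyRange_one]; omega, by simp⟩

lemma length_cellsL (n : Int) : (cellsL n).length = n.toNat * n.toNat := by
  unfold cellsL
  rw [List.length_flatMap]
  have : (fun (a : Int) => ((PySem.List.pyRange 0 n 1).map fun j => (a, j)).length)
      = fun (_ : Int) => n.toNat := by
    funext i
    simp [PySem.List.length_pyRange_one]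
  rw [this, PySem.List.sum_map_const_nat, PySem.List.length_pyRange_one]
  norm_num

lemma card_okB (n : Int) (r : List (Int × Int)) (hn : r.Nodup) (h : ∀ a ∈ r, okB n a) :
    r.length ≤ n.toNat * n.toNat := by
  have hsub : r.toFinset ⊆ (cellsL n).toFinset := by
    intro a ha
    rw [List.mem_toFinset] at ha ⊢
    exact mem_cellsL n a (h a ha)
  calc r.length = r.toFinset.card := (List.toFinset_card_of_nodup hn).symm
    _ ≤ (cellsL n).toFinset.card := Finset.card_le_card hsub
    _ ≤ (cellsL n).length := List.toFinset_card_le _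
    _ = n.toNat * n.toNat := length_cellsL n

lemma loopB_closed (n : Int) (grid : List (List Int)) (low high : Int) :
    ∀ (k : Nat) (r : PySem.Set (Int × Int)), r.Nodup → (∀ a ∈ r, okB n a) →
    n.toNat * n.toNat + 1 ≤ k + r.length →
    (loopB n grid low high k r).Nodup ∧
    (∀ y, y ∈ roundB n grid low high (loopB n grid low high k r) ↔ y ∈ loopB n grid low high k r) := by
  intro k
  induction k with
  | zero =>
    intro r hn hok hlen
    exact absurd (card_okB n r hn hok) (by omega)
  | succ m ih =>
    intro r hn hok hlen
    unfold loopB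
    simp only
    split_ifs with heq
    · refine ⟨hn, ?_⟩
      intro y
      exact (PySem.Set.equal_iff _ _).mp heq y
    · have hng := nodup_roundB n grid low high r hn
      have hsub : ∀ y ∈ r, y ∈ roundB n grid low high r :=
        fun y hy => (mem_roundB n grid low high r y).mpr (Or.inl hy)
      have hokg : ∀ a ∈ roundB n grid low high r, okB n a := by
        intro a ha
        rcases (mem_roundB n grid low high r a).mp ha with h | ⟨c, _, hstep⟩
        · exact hok a h
        · exact hstep.1.1
      have hne : ∃ y, y ∈ roundB n grid low high r ∧ y ∉ r := by
        by_contra hcon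
        push_neg at hcon
        exact heq ((PySem.Set.equal_iff _ _).mpr
          (fun x => ⟨fun hx => hcon x hx, hsub x⟩))
      have hlt : r.length < (roundB n grid low high r).length := by
        obtain ⟨y, hy1, hy2⟩ := hne
        have h1 : r.toFinset ⊂ (roundB n grid low high r).toFinset := by
          constructor
          · intro a ha; rw [List.mem_toFinset] at ha ⊢; exact hsub a ha
          · intro hcon
            exact hy2 (List.mem_toFinset.mp (hcon (List.mem_toFinset.mpr hy1)))
        calc r.length = r.toFinset.card := (List.toFinset_card_of_nodup hn).symm
          _ < (roundB n grid low high r).toFinset.card := Finset.card_lt_card h1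
          _ = (roundB n grid low high r).length := List.toFinset_card_of_nodup hng
      exact ih _ hng hokg (by omega)

lemma fold_relax_spec (n : Int) (grid : List (List Int)) (low high : Int) (c : Int × Int) :
    ∀ (ds : List (Int × Int)) (vis : List (List Bool)) (q₀ : List (Int × Int)), Vsh n vis →
    ∃ extra : List (Int × Int),
      (ds.foldl (relaxA n grid low high c.1 c.2) (vis, q₀)).2 = q₀ ++ extra ∧
      Vsh n (ds.foldl (relaxA n grid low high c.1 c.2) (vis, q₀)).1 ∧
      extra.Nodup ∧
      (∀ a ∈ extra, okP n grid low high a ∧ getV vis a.1 a.2 = false ∧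
        ∃ d ∈ ds, a = (c.1 + d.1, c.2 + d.2)) ∧
      (∀ a : Int × Int, okB n a →
        (getV (ds.foldl (relaxA n grid low high c.1 c.2) (vis, q₀)).1 a.1 a.2 = true ↔
          getV vis a.1 a.2 = true ∨ a ∈ extra)) ∧
      fcV (ds.foldl (relaxA n grid low high c.1 c.2) (vis, q₀)).1 + extra.length = fcV vis ∧
      (∀ d ∈ ds, okP n grid low high (c.1 + d.1, c.2 + d.2) →
        getV (ds.foldl (relaxA n grid low high c.1 c.2) (vis, q₀)).1 (c.1 + d.1) (c.2 + d.2) = true) := by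
  intro ds
  induction ds with
  | nil =>
    intro vis q₀ hs
    exact ⟨[], by simp, hs, by simp, by simp, by simp, by simp, by simp⟩
  | cons d t ih =>
    intro vis q₀ hs
    simp only [List.foldl_cons]
    by_cases hb : 0 ≤ c.1 + d.1 ∧ c.1 + d.1 < n ∧ 0 ≤ c.2 + d.2 ∧ c.2 + d.2 < n
    · by_cases hv : getV vis (c.1 + d.1) (c.2 + d.2) = true
      · -- already visited: state unchanged
        have hst : relaxA n grid low high c.1 c.2 (vis, q₀) d = (vis, q₀) := by
          simp [relaxA, hb, hv]
        rw [hst]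
        obtain ⟨extra, e1, e2, e3, e4, e5, e6, e7⟩ := ih vis q₀ hs
        refine ⟨extra, e1, e2, e3, ?_, e5, e6, ?_⟩
        · intro a ha
          obtain ⟨p1, p2, dd, hdd, hadd⟩ := e4 a ha
          exact ⟨p1, p2, dd, by simp [hdd], hadd⟩
        · intro d' hd' hok
          rcases List.mem_cons.mp hd' with rfl | hd'
          · exact ((e5 _ hok.1).mpr (Or.inl hv))
          · exact e7 d' hd' hok
      · by_cases hr : low ≤ pvVal grid (c.1 + d.1) (c.2 + d.2) ∧ pvVal grid (c.1 + d.1) (c.2 + d.2) ≤ high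
        · -- fresh admissible cell: mark it and enqueue it
          have hst : relaxA n grid low high c.1 c.2 (vis, q₀) d
              = (setV vis (c.1 + d.1) (c.2 + d.2), q₀ ++ [(c.1 + d.1, c.2 + d.2)]) := by
            simp [relaxA, hb, hv, hr]
          rw [hst]
          have hokb : okB n (c.1 + d.1, c.2 + d.2) := ⟨hb.1, hb.2.1, hb.2.2.1, hb.2.2.2⟩
          have hokp : okP n grid low high (c.1 + d.1, c.2 + d.2) := ⟨hokb, hr⟩
          have hsh' : Vsh n (setV vis (c.1 + d.1) (c.2 + d.2)) :=
            shape_setV n vis _ _ hs hb.1 hb.2.1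
          obtain ⟨extra, e1, e2, e3, e4, e5, e6, e7⟩ :=
            ih (setV vis (c.1 + d.1) (c.2 + d.2)) (q₀ ++ [(c.1 + d.1, c.2 + d.2)]) hsh'
          have hself : getV (setV vis (c.1 + d.1) (c.2 + d.2)) (c.1 + d.1) (c.2 + d.2) = true := by
            rw [getV_setV n vis _ _ _ _ hs hokb hokb]
            simp
          have hfresh : (c.1 + d.1, c.2 + d.2) ∉ extra := by
            intro hmem
            have h2 := (e4 _ hmem).2.1
            simp only [] at h2
            simp [hself] at h2
          have hgv : ∀ a : Int × Int, okB n a →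
              getV (setV vis (c.1 + d.1) (c.2 + d.2)) a.1 a.2
                = if a = (c.1 + d.1, c.2 + d.2) then true else getV vis a.1 a.2 := by
            intro a hab
            rw [show a = (a.1, a.2) from rfl] at hab ⊢
            rw [getV_setV n vis _ _ _ _ hs hokb hab]
            by_cases hae : a.1 = c.1 + d.1 ∧ a.2 = c.2 + d.2
            · rw [if_pos hae, if_pos (by simp [hae])]
            · rw [if_neg hae, if_neg (by simp [Prod.ext_iff]; tauto)]
          refine ⟨(c.1 + d.1, c.2 + d.2) :: extra, ?_, e2, ?_, ?_, ?_, ?_, ?_⟩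
          · rw [e1, List.append_assoc]; rfl
          · exact List.nodup_cons.mpr ⟨hfresh, e3⟩
          · intro a ha
            rcases List.mem_cons.mp ha with rfl | ha
            · exact ⟨hokp, by simpa using hv, d, by simp, rfl⟩
            · obtain ⟨p1, p2, dd, hdd, hadd⟩ := e4 a ha
              refine ⟨p1, ?_, dd, by simp [hdd], hadd⟩
              rw [hgv a p1.1] at p2
              by_cases hae : a = (c.1 + d.1, c.2 + d.2)
              · rw [if_pos hae] at p2; simp at p2
              · rwa [if_neg hae] at p2
          · intro a hab
            rw [e5 a hab, hgv a hab]
            by_cases hae : a = (c.1 + d.1, c.2 + d.2)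
            · subst hae
              simp
            · rw [if_neg hae]
              simp only [List.mem_cons]
              tauto
          · have := fc_setV n vis _ _ hs hokb (by simpa using hv)
            simp only [List.length_cons]
            omega
          · intro d' hd' hok
            rcases List.mem_cons.mp hd' with rfl | hd'
            · rw [e5 _ hok.1]
              exact Or.inl hself
            · exact e7 d' hd' hok
        · -- value out of range: state unchanged
          have hst : relaxA n grid low high c.1 c.2 (vis, q₀) d = (vis, q₀) := by
            simp [relaxA, hb, hv, hr]
          rw [hst]
          obtain ⟨extra, e1, e2, e3, e4, e5, e6, e7⟩ := ih vis q₀ hs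
          refine ⟨extra, e1, e2, e3, ?_, e5, e6, ?_⟩
          · intro a ha
            obtain ⟨p1, p2, dd, hdd, hadd⟩ := e4 a ha
            exact ⟨p1, p2, dd, by simp [hdd], hadd⟩
          · intro d' hd' hok
            rcases List.mem_cons.mp hd' with rfl | hd'
            · exact absurd hok.2 hr
            · exact e7 d' hd' hok
    · -- out of bounds: state unchanged
      have hst : relaxA n grid low high c.1 c.2 (vis, q₀) d = (vis, q₀) := by
        simp only [relaxA]
        rw [if_neg hb]
      rw [hst]
      obtain ⟨extra, e1, e2, e3, e4, e5, e6, e7⟩ := ih vis q₀ hs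
      refine ⟨extra, e1, e2, e3, ?_, e5, e6, ?_⟩
      · intro a ha
        obtain ⟨p1, p2, dd, hdd, hadd⟩ := e4 a ha
        exact ⟨p1, p2, dd, by simp [hdd], hadd⟩
      · intro d' hd' hok
        rcases List.mem_cons.mp hd' with rfl | hd'
        · exact absurd ⟨hok.1.1, hok.1.2.1, hok.1.2.2.1, hok.1.2.2.2⟩ hb
        · exact e7 d' hd' hok

lemma loopA_spec (n : Int) (grid : List (List Int)) (low high ei ej : Int) :
    ∀ (fuel : Nat) (vis : List (List Bool)) (q : List (Int × Int)), Vsh n vis →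
    (∀ a ∈ q, okB n a ∧ getV vis a.1 a.2 = true) →
    q.Nodup →
    ((okB n ((ei, ej) : Int × Int) ∧ getV vis ei ej = true) → ((ei, ej) : Int × Int) ∈ q) →
    (∀ a : Int × Int, okB n a → getV vis a.1 a.2 = true → a ∉ q →
      ∀ b, stepP n grid low high a b → getV vis b.1 b.2 = true) →
    fcV vis + q.length < fuel →
    (loopA n grid ei ej low high fuel vis q = true ↔
      ∃ a : Int × Int, okB n a ∧ getV vis a.1 a.2 = true ∧ Rch n grid low high a (ei, ej)) := by
  intro fuel
  induction fuel with
  | zero => intro vis q _ _ _ _ _ hm; omega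
  | succ f ih =>
    intro vis q hs hq hnd hE hcl hm
    match q with
    | [] =>
      simp only [loopA]
      constructor
      · intro h; cases h
      · rintro ⟨a, ha1, ha2, ha3⟩
        have hPe : okB n ((ei, ej) : Int × Int) ∧ getV vis ei ej = true := by
          have := rtg_closed n grid low high
            (fun x => okB n x ∧ getV vis x.1 x.2 = true)
            (fun x y hx hxy => ⟨hxy.1.1, hcl x hx.1 hx.2 (by simp) y hxy⟩)
            a (ei, ej) ⟨ha1, ha2⟩ ha3
          exact this
        cases hE hPe
    | (ci, cj) :: q' =>
      by_cases hend : ci = ei ∧ cj = ej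
      · simp only [loopA, if_pos hend]
        constructor
        · intro _
          refine ⟨(ci, cj), (hq _ (by simp)).1, (hq _ (by simp)).2, ?_⟩
          rw [show ((ei, ej) : Int × Int) = (ci, cj) by
            obtain ⟨h1, h2⟩ := hend; rw [h1, h2]]
          exact Relation.ReflTransGen.refl
        · intro _; trivial
      · simp only [loopA, if_neg hend]
        obtain ⟨extra, e1, e2, e3, e4, e5, e6, e7⟩ :=
          fold_relax_spec n grid low high (ci, cj) dirsA vis q' hs
        set st := dirsA.foldl (relaxA n grid low high ci cj) (vis, q') with hstdef
        have hqm : ∀ a ∈ (ci, cj) :: q', okB n a ∧ getV vis a.1 a.2 = true := hq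
        have hcv : getV vis ci cj = true := (hq (ci, cj) (by simp)).2
        have hcb : okB n ((ci, cj) : Int × Int) := (hq (ci, cj) (by simp)).1
        have hndq' : q'.Nodup := (List.nodup_cons.mp hnd).2
        have hcq' : ((ci, cj) : Int × Int) ∉ q' := (List.nodup_cons.mp hnd).1
        -- new queue members are in bounds and marked
        have hq'' : ∀ a ∈ st.2, okB n a ∧ getV st.1 a.1 a.2 = true := by
          rw [e1]
          intro a ha
          rcases List.mem_append.mp ha with ha | ha
          · have h := hq a (by simp [ha])
            exact ⟨h.1, (e5 a h.1).mpr (Or.inl h.2)⟩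
          · have h := e4 a ha
            exact ⟨h.1.1, (e5 a h.1.1).mpr (Or.inr ha)⟩
        have hnd'' : st.2.Nodup := by
          rw [e1]
          refine List.Nodup.append hndq' e3 ?_
          intro a ha hb
          have h1 := (hq a (by simp [ha])).2
          have h2 := (e4 a hb).2.1
          rw [h1] at h2
          cases h2
        have hE'' : (okB n ((ei, ej) : Int × Int) ∧ getV st.1 ei ej = true) →
            ((ei, ej) : Int × Int) ∈ st.2 := by
          rintro ⟨hb1, hb2⟩
          rw [e1]
          have := (e5 ((ei, ej) : Int × Int) hb1).mp hb2
          rcases this with h | h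
          · have : ((ei, ej) : Int × Int) ∈ (ci, cj) :: q' := hE ⟨hb1, h⟩
            rcases List.mem_cons.mp this with heq | hmem
            · exact absurd ⟨(congrArg Prod.fst heq).symm, (congrArg Prod.snd heq).symm⟩ hend
            · exact List.mem_append.mpr (Or.inl hmem)
          · exact List.mem_append.mpr (Or.inr h)
        have hcl'' : ∀ a : Int × Int, okB n a → getV st.1 a.1 a.2 = true → a ∉ st.2 →
            ∀ b, stepP n grid low high a b → getV st.1 b.1 b.2 = true := by
          intro a hab hav hanq b hstep
          have hbok : okB n b := hstep.1.1
          rcases (e5 a hab).mp hav with hold | hnew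
          · by_cases hac : a = (ci, cj)
            · subst hac
              obtain ⟨d, hd, rfl, hok⟩ := stepP_cases n grid low high _ _ hstep
              exact e7 d hd hok
            · have hanq' : a ∉ (ci, cj) :: q' := by
                intro hmem
                rcases List.mem_cons.mp hmem with h | h
                · exact hac h
                · exact hanq (by rw [e1]; exact List.mem_append.mpr (Or.inl h))
              have := hcl a hab hold hanq' b hstep
              exact (e5 b hbok).mpr (Or.inl this)
          · exact absurd (by rw [e1]; exact List.mem_append.mpr (Or.inr hnew)) hanq
        have hm'' : fcV st.1 + st.2.length < f := by
          have : st.2.length = q'.length + extra.length := by rw [e1]; simp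
          simp only [List.length_cons] at hm
          omega
        rw [ih st.1 st.2 e2 hq'' hnd'' hE'' hcl'' hm'']
        constructor
        · rintro ⟨a, ha1, ha2, ha3⟩
          rcases (e5 a ha1).mp ha2 with hold | hnew
          · exact ⟨a, ha1, hold, ha3⟩
          · obtain ⟨p1, _, d, hd, rfl⟩ := e4 a hnew
            have hstep : stepP n grid low high (ci, cj) (ci + d.1, cj + d.2) := by
              rw [← dir_iff]
              exact ⟨d, hd, (okCellB_iff n grid low high _ _).mpr (by simpa using p1), rfl⟩
            exact ⟨(ci, cj), hcb, hcv, Relation.ReflTransGen.head hstep ha3⟩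
        · rintro ⟨a, ha1, ha2, ha3⟩
          exact ⟨a, ha1, (e5 a ha1).mpr (Or.inl ha2), ha3⟩

lemma A_iff (n : Int) (grid : List (List Int)) (si sj ei ej low high : Int)
    (hp : grid.length = n.toNat ∧ (∀ r ∈ grid, r.length = n.toNat) ∧
      0 ≤ si ∧ si < n ∧ 0 ≤ sj ∧ sj < n ∧ 0 ≤ ei ∧ ei < n ∧ 0 ≤ ej ∧ ej < n)
    (hg : low ≤ pvVal grid si sj ∧ pvVal grid si sj ≤ high) :
    (bfs_with_restriction n grid si sj ei ej low high = true ↔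
      Rch n grid low high (si, sj) (ei, ej)) := by
  obtain ⟨hgl, hgr, hsi1, hsi2, hsj1, hsj2, hei1, hei2, hej1, hej2⟩ := hp
  have hsb : okB n ((si, sj) : Int × Int) := ⟨hsi1, hsi2, hsj1, hsj2⟩
  have heb : okB n ((ei, ej) : Int × Int) := ⟨hei1, hei2, hej1, hej2⟩
  have hs0 : Vsh n (setV (mkVis n) si sj) :=
    shape_setV n (mkVis n) si sj (shape_mkVis n) hsi1 hsi2
  have hchar : ∀ a : Int × Int, okB n a →
      (getV (setV (mkVis n) si sj) a.1 a.2 = true ↔ a = (si, sj)) := by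
    intro a hab
    rw [show a = (a.1, a.2) from rfl] at hab ⊢
    rw [getV_setV n (mkVis n) si sj a.1 a.2 (shape_mkVis n) hsb hab]
    by_cases hae : a.1 = si ∧ a.2 = sj
    · rw [if_pos hae]
      simp [hae]
    · rw [if_neg hae, getV_mkVis]
      simp [Prod.ext_iff]
      tauto
  have hmeas : fcV (setV (mkVis n) si sj) + 1 = n.toNat * n.toNat := by
    rw [← fc_mkVis n]
    exact fc_setV n (mkVis n) si sj (shape_mkVis n) hsb (getV_mkVis n si sj)
  unfold bfs_with_restriction
  rw [if_pos hg]
  simp only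
  rw [loopA_spec n grid low high ei ej (n.toNat * n.toNat + 1) (setV (mkVis n) si sj)
    [(si, sj)] hs0
    (by
      intro a ha
      rw [List.mem_singleton] at ha
      subst ha
      exact ⟨hsb, (hchar _ hsb).mpr rfl⟩)
    (by simp)
    (by
      intro h
      rw [List.mem_singleton]
      exact (hchar _ heb).mp h.2)
    (by
      intro a hab hav hanq b hstep
      exact absurd (List.mem_singleton.mpr ((hchar a hab).mp hav)) hanq)
    (by simp [hmeas])]
  constructor
  · rintro ⟨a, ha1, ha2, ha3⟩
    rwa [(hchar a ha1).mp ha2] at ha3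
  · intro h
    exact ⟨(si, sj), hsb, (hchar _ hsb).mpr rfl, h⟩

lemma B_iff (n : Int) (grid : List (List Int)) (si sj ei ej low high : Int)
    (hp : grid.length = n.toNat ∧ (∀ r ∈ grid, r.length = n.toNat) ∧
      0 ≤ si ∧ si < n ∧ 0 ≤ sj ∧ sj < n ∧ 0 ≤ ei ∧ ei < n ∧ 0 ≤ ej ∧ ej < n)
    (hg : low ≤ pvVal grid si sj ∧ pvVal grid si sj ≤ high) :
    (bfs_with_restriction_alt n grid si sj ei ej low high = true ↔
      Rch n grid low high (si, sj) (ei, ej)) := by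
  obtain ⟨hgl, hgr, hsi1, hsi2, hsj1, hsj2, hei1, hei2, hej1, hej2⟩ := hp
  have hsb : okB n ((si, sj) : Int × Int) := ⟨hsi1, hsi2, hsj1, hsj2⟩
  have hr0 : PySem.Set.ofList [((si, sj) : Int × Int)] = [(si, sj)] :=
    PySem.Set.ofList_eq_self_of_nodup _ (by simp)
  have hnd0 : ([((si, sj) : Int × Int)] : List (Int × Int)).Nodup := by simp
  obtain ⟨hndF, hclF⟩ := loopB_closed n grid low high (n.toNat * n.toNat) [(si, sj)] hnd0
    (by intro a ha; rw [List.mem_singleton] at ha; subst ha; exact hsb)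
    (by simp)
  unfold bfs_with_restriction_alt
  rw [if_pos hg]
  simp only
  rw [hr0, PySem.Set.contains_iff]
  constructor
  · intro h
    refine loopB_sound n grid low high (si, sj) (n.toNat * n.toNat) [(si, sj)] ?_ _ h
    intro a ha
    rw [List.mem_singleton] at ha
    subst ha
    exact Relation.ReflTransGen.refl
  · intro h
    refine rtg_closed n grid low high
      (fun x => x ∈ loopB n grid low high (n.toNat * n.toNat) [(si, sj)]) ?_ (si, sj) _ ?_ h
    · intro a b ha hab
      exact (hclF b).mp ((mem_roundB n grid low high _ b).mpr (Or.inr ⟨a, ha, hab⟩))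
    · exact loopB_mono n grid low high (n.toNat * n.toNat) [(si, sj)] (si, sj) (by simp)

-- ===== VERDICT (by name: the statement is the Claim_ definition above) =====
theorem bfs_with_restriction_spec : Claim_equal_bfs_with_restriction := by
  intro n grid si sj ei ej low high _ hp
  unfold Spec_bfs_with_restriction
  by_cases hg : low ≤ pvVal grid si sj ∧ pvVal grid si sj ≤ high
  · have hp' := hp.resolve_left (fun h => h.2.2 hg)
    have h1 := A_iff n grid si sj ei ej low high hp' hg
    have h2 := B_iff n grid si sj ei ej low high hp' hg
    cases hA : bfs_with_restriction n grid si sj ei ej low high <;>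
      cases hB : bfs_with_restriction_alt n grid si sj ei ej low high <;> simp_all
  · unfold bfs_with_restriction bfs_with_restriction_alt
    simp [hg]
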